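-- pv_equiv track=rewrite | github.com/lthoang/sentires-mp | etc/code/dump_profile.py | get_long_opinion_phrases
-- ===== SOURCE A (Python) =====
-- def get_long_opinion_phrases(phrases=[]):
--     phrases_index = {}
--     for phrase in phrases:
--         for token in phrase.split():
--             token_phrases = phrases_index.setdefault(token, [])
--             if phrase not in token_phrases:
--                 token_phrases.append(phrase)
--             token_phrases.sort(key=len, reverse=True)
--     return phrases_index
-- ===== SOURCE B (Python) =====
-- def get_long_opinion_phrases(phrases=[]):
--     # For each token, when it is first seen, compute its whole bucket directly:
--     # the distinct phrases containing that token, in input order, sorted once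
--     # by length descending (stable).  No incremental bucket mutation.
--     phrases_index = {}
--     for phrase in phrases:
--         for token in phrase.split():
--             if token not in phrases_index:
--                 phrases_index[token] = sorted(
--                     dict.fromkeys(p for p in phrases if token in p.split()),
--                     key=len, reverse=True)
--     return phrases_index
-- ===== Notes on version B (the rewrite author's own statement) =====
-- stated objective: alternative
-- what changed: Instead of A's incremental index (append each phrase into a mutable per-token bucket and re-sort that bucket after every token occurrence), B computes each token's bucket once, directly and immutably, at the token's first occurrence: an ordered dedup (dict.fromkeys) of the full-list filter of phrases containing the token, sorted a single time by length descending.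
import Mathlib
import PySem

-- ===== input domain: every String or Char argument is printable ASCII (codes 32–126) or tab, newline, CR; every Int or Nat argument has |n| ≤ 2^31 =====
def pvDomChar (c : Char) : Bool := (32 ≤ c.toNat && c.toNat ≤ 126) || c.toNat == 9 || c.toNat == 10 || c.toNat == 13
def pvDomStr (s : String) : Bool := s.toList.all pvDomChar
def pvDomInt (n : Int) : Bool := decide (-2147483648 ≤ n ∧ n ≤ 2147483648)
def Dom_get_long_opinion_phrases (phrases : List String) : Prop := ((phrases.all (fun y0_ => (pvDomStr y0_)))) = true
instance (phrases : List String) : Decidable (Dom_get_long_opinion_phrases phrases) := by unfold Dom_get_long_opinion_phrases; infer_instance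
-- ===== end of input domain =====

-- B computes each token's bucket once at the token's first occurrence — an ordered dedup of the
-- full-list filter, sorted a single time — instead of A's incremental buckets re-sorted after
-- every token occurrence (objective: alternative).


-- ===== PORT A =====
def get_long_opinion_phrases (phrases : List String) : List (String × List String) :=
  (phrases.foldl (fun d phrase =>
      (PySem.Str.split₀ phrase).foldl (fun d token =>
        let d := d.setdefault token ([] : List String)
        let token_phrases := d.getD token []
        let token_phrases := if phrase ∈ token_phrases then token_phrases else token_phrases ++ [phrase]
        d.insert token (PySem.List.sorted token_phrases PySem.Str.len true)) d)
    PySem.Dict.empty).items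

-- ===== PORT B =====
def get_long_opinion_phrases_alt (phrases : List String) : List (String × List String) :=
  (phrases.foldl (fun d phrase =>
      (PySem.Str.split₀ phrase).foldl (fun d token =>
        if d.contains token then d
        else d.insert token
          (PySem.List.sorted
            (PySem.List.dedup (phrases.filter (fun p => decide (token ∈ PySem.Str.split₀ p))))
            PySem.Str.len true)) d)
    PySem.Dict.empty).items

-- ===== PRECONDITION & SPEC =====
def Spec_get_long_opinion_phrases (phrases : List String) (out : List (String × List String)) : Prop := out = get_long_opinion_phrases_alt phrases
instance (phrases : List String) (out : List (String × List String)) : Decidable (Spec_get_long_opinion_phrases phrases out) := by unfold Spec_get_long_opinion_phrases; infer_instance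

-- ===== CLAIM (what is proved, stated in full; the proofs are below) =====
def Claim_equal_get_long_opinion_phrases : Prop := ∀ (phrases : List String), Dom_get_long_opinion_phrases phrases → Spec_get_long_opinion_phrases phrases (get_long_opinion_phrases phrases)

-- ===== LEMMAS AND PROOFS =====

-- sort a bucket (the value transformation relating raw buckets to A's sorted ones)
def pvSortVal (kb : String × List String) : String × List String :=
  (kb.1, PySem.List.sorted kb.2 PySem.Str.len true)

def pvSortVals (d : PySem.Dict String (List String)) : PySem.Dict String (List String) :=
  PySem.Dict.mk (d.items.map pvSortVal)

-- A's loop body, named (let-free but definitionally equal to the port's body)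
def pvAstep (phrase : String) (d : PySem.Dict String (List String)) (token : String) :
    PySem.Dict String (List String) :=
  (d.setdefault token ([] : List String)).insert token
    (PySem.List.sorted
      (if phrase ∈ (d.setdefault token ([] : List String)).getD token []
       then (d.setdefault token ([] : List String)).getD token []
       else (d.setdefault token ([] : List String)).getD token [] ++ [phrase])
      PySem.Str.len true)

-- the same step without the re-sorting: dedup-append into the bucket
def pvBstep (phrase : String) (d : PySem.Dict String (List String)) (token : String) :
    PySem.Dict String (List String) :=
  if phrase ∈ (d.setdefault token ([] : List String)).getD token []
  then d.setdefault token ([] : List String)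
  else (d.setdefault token ([] : List String)).insert token
    ((d.setdefault token ([] : List String)).getD token [] ++ [phrase])

-- B's final bucket for a token
def pvVal (phrases : List String) (t : String) : List String :=
  PySem.List.sorted
    (PySem.List.dedup (phrases.filter (fun p => decide (t ∈ PySem.Str.split₀ p))))
    PySem.Str.len true

-- B's loop body, named
def pvCstep (phrases : List String) (d : PySem.Dict String (List String)) (token : String) :
    PySem.Dict String (List String) :=
  if d.contains token then d else d.insert token (pvVal phrases token)

-- the raw (unsorted) bucket
def pvBucket (phrases : List String) (t : String) : List String :=
  PySem.List.dedup (phrases.filter (fun p => decide (t ∈ PySem.Str.split₀ p)))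

-- the (token, phrase) occurrence stream
def pvPairs (phrases : List String) : List (String × String) :=
  phrases.flatMap (fun p => (PySem.Str.split₀ p).map (fun t => (t, p)))

lemma pvA_eq (phrases : List String) :
    get_long_opinion_phrases phrases =
      (phrases.foldl (fun d phrase => (PySem.Str.split₀ phrase).foldl (pvAstep phrase) d)
        PySem.Dict.empty).items := rfl

lemma pvB_eq (phrases : List String) :
    get_long_opinion_phrases_alt phrases =
      (phrases.foldl (fun d phrase => (PySem.Str.split₀ phrase).foldl (pvCstep phrases) d)
        PySem.Dict.empty).items := rfl

lemma contains_pvSortVals (d : PySem.Dict String (List String)) (t : String) :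
    (pvSortVals d).contains t = d.contains t := by
  simp only [pvSortVals, PySem.Dict.contains, List.any_map]
  rfl

lemma keys_pvSortVals (d : PySem.Dict String (List String)) :
    (pvSortVals d).items.map Prod.fst = d.items.map Prod.fst := by
  simp only [pvSortVals, List.map_map]
  rfl

lemma get?_pvSortVals (d : PySem.Dict String (List String)) (t : String) :
    (pvSortVals d).get? t = (d.get? t).map (fun b => PySem.List.sorted b PySem.Str.len true) := by
  simp only [pvSortVals, PySem.Dict.get?, List.find?_map, Option.map_map]
  rfl

lemma getD_pvSortVals (d : PySem.Dict String (List String)) (t : String) :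
    (pvSortVals d).getD t [] = PySem.List.sorted (d.getD t []) PySem.Str.len true := by
  simp only [PySem.Dict.getD, get?_pvSortVals]
  cases d.get? t with
  | none => rfl
  | some b => rfl

lemma setdefault_pvSortVals (d : PySem.Dict String (List String)) (t : String) :
    pvSortVals (d.setdefault t []) = (pvSortVals d).setdefault t [] := by
  unfold PySem.Dict.setdefault
  rw [contains_pvSortVals]
  split_ifs with h
  · rfl
  · simp [pvSortVals, pvSortVal, PySem.List.sorted]

lemma insert_pvSortVals (d : PySem.Dict String (List String)) (t : String) (v : List String) :
    pvSortVals (d.insert t v) = (pvSortVals d).insert t (PySem.List.sorted v PySem.Str.len true) := by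
  unfold PySem.Dict.insert
  rw [contains_pvSortVals]
  split_ifs with h
  · simp only [pvSortVals, List.map_map]
    congr 1
    apply List.map_congr_left
    intro p _
    by_cases hp : p.1 = t
    · simp [pvSortVal, hp]
    · simp [pvSortVal, hp]
  · simp [pvSortVals, pvSortVal]

-- list form: overwriting the unique entry with key t by its current value is the identity
lemma pvOverwrite_self (l : List (String × List String)) (t : String) (v : List String)
    (hnd : (l.map Prod.fst).Nodup)
    (h : l.find? (fun p => p.1 == t) = some (t, v)) :
    l.map (fun p => if (p.1 == t) = true then (t, v) else p) = l := by
  induction l with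
  | nil => simp at h
  | cons p rest ih =>
    simp only [List.map_cons, List.nodup_cons] at hnd
    by_cases hp : p.1 = t
    · have hfind : List.find? (fun q => q.1 == t) (p :: rest) = some p := by
        simp [hp]
      rw [hfind] at h
      have hpv : p = (t, v) := by injection h
      have hrest : ∀ q ∈ rest, (q.1 == t) = false := by
        intro q hq
        have : q.1 ≠ t := by
          intro hqt
          exact hnd.1 (hp ▸ hqt ▸ List.mem_map_of_mem hq)
        simp [this]
      simp only [List.map_cons, hp, List.cons.injEq]
      refine ⟨by simp [hpv], ?_⟩
      rw [List.map_congr_left (fun q hq => by rw [hrest q hq])] ; exact (List.map_id _)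
    · have hfind : List.find? (fun q => q.1 == t) (p :: rest) = List.find? (fun q => q.1 == t) rest := by
        simp [hp]
      rw [hfind] at h
      simp only [List.map_cons, List.cons.injEq]
      exact ⟨by simp [hp], ih hnd.2 h⟩

lemma pvInsert_self (d : PySem.Dict String (List String)) (t : String) (v : List String)
    (hnd : (d.items.map Prod.fst).Nodup) (h : d.get? t = some v) :
    d.insert t v = d := by
  obtain ⟨q, hq, hq2⟩ : ∃ q, List.find? (fun p => p.1 == t) d.items = some q ∧ q.2 = v := by
    unfold PySem.Dict.get? at h
    cases hf : List.find? (fun p => p.1 == t) d.items with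
    | none => rw [hf] at h; simp at h
    | some q => rw [hf] at h; exact ⟨q, rfl, by injection h⟩
  have hq1 : q.1 = t := by
    have := List.find?_some hq
    simpa using this
  have hqtv : q = (t, v) := Prod.ext hq1 hq2
  have hc : d.contains t = true := by
    unfold PySem.Dict.contains
    rw [List.any_eq_true]
    exact ⟨q, List.mem_of_find?_eq_some hq, by simp [hq1]⟩
  unfold PySem.Dict.insert
  rw [hc]
  simp only [if_true]
  apply PySem.Dict.ext
  exact pvOverwrite_self d.items t v hnd (hqtv ▸ hq)

lemma pvKeys_setdefault_nodup (d : PySem.Dict String (List String)) (t : String)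
    (hnd : (d.items.map Prod.fst).Nodup) :
    ((d.setdefault t []).items.map Prod.fst).Nodup := by
  unfold PySem.Dict.setdefault
  split_ifs with h
  · exact hnd
  · simp only [List.map_append, List.map_cons, List.map_nil]
    refine List.Nodup.append hnd (List.nodup_singleton _) ?_
    intro a ha hb
    simp only [List.mem_singleton] at hb
    subst hb
    unfold PySem.Dict.contains at h
    simp only [List.any_eq_true, not_exists, not_and] at h
    obtain ⟨q, hq, hq1⟩ := List.mem_map.mp ha
    exact h q hq (by simp [hq1])

lemma pvKeys_insert (d : PySem.Dict String (List String)) (t : String) (v : List String)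
    (hc : d.contains t = true) :
    (d.insert t v).items.map Prod.fst = d.items.map Prod.fst := by
  unfold PySem.Dict.insert
  rw [hc]
  simp only [if_true, List.map_map]
  apply List.map_congr_left
  intro p _
  by_cases hp : p.1 = t
  · simp [hp]
  · simp [hp]

lemma pvContains_setdefault_self (d : PySem.Dict String (List String)) (t : String) :
    (d.setdefault t ([] : List String)).contains t = true := by
  unfold PySem.Dict.setdefault
  split_ifs with h
  · exact h
  · unfold PySem.Dict.contains
    simp

lemma pvBstep_nodup (phrase : String) (d : PySem.Dict String (List String)) (token : String)
    (hnd : (d.items.map Prod.fst).Nodup) :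
    ((pvBstep phrase d token).items.map Prod.fst).Nodup := by
  unfold pvBstep
  have h1 := pvKeys_setdefault_nodup d token hnd
  split_ifs with h
  · exact h1
  · rw [pvKeys_insert _ token _ (pvContains_setdefault_self d token)]
    exact h1

lemma pvGet?_setdefault_self (d : PySem.Dict String (List String)) (t : String) :
    (d.setdefault t ([] : List String)).get? t =
      some ((d.setdefault t ([] : List String)).getD t []) := by
  rw [PySem.Dict.get?_setdefault_self]
  unfold PySem.Dict.getD
  rw [PySem.Dict.get?_setdefault_self]
  rfl

-- incremental stable sorting: sorting after appending to an already-sorted list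
-- equals sorting the raw appended list
lemma pvSorted_append_singleton (b : List String) (p : String) :
    PySem.List.sorted (PySem.List.sorted b PySem.Str.len true ++ [p]) PySem.Str.len true =
      PySem.List.sorted (b ++ [p]) PySem.Str.len true := by
  have h1 : ∀ X : List String, PySem.List.sorted (X ++ [p]) PySem.Str.len true =
      PySem.List.insertBy (fun a b => decide (PySem.Str.len b < PySem.Str.len a)) p
        (PySem.List.sorted X PySem.Str.len true) := by
    intro X
    rw [PySem.List.sorted_rev_eq_foldl_insertBy, PySem.List.sorted_rev_eq_foldl_insertBy,
      List.foldl_append]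
    rfl
  rw [h1, h1, PySem.List.sorted_rev_sorted_rev]

lemma pvStep_comm (phrase : String) (d : PySem.Dict String (List String)) (token : String)
    (hnd : (d.items.map Prod.fst).Nodup) :
    pvAstep phrase (pvSortVals d) token = pvSortVals (pvBstep phrase d token) := by
  unfold pvAstep pvBstep
  rw [← setdefault_pvSortVals]
  rw [getD_pvSortVals]
  simp only [PySem.List.mem_sorted]
  have hnd1 : ((d.setdefault token ([] : List String)).items.map Prod.fst).Nodup :=
    pvKeys_setdefault_nodup d token hnd
  by_cases h : phrase ∈ (d.setdefault token ([] : List String)).getD token []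
  · rw [if_pos h, if_pos h]
    rw [PySem.List.sorted_rev_sorted_rev]
    exact pvInsert_self (pvSortVals (d.setdefault token ([] : List String))) token _
      (by rw [keys_pvSortVals]; exact hnd1)
      (by rw [get?_pvSortVals, pvGet?_setdefault_self d token]; rfl)
  · rw [if_neg h, if_neg h]
    rw [pvSorted_append_singleton, insert_pvSortVals]

lemma pvInnerFold_comm (tokens : List String) (phrase : String)
    (d : PySem.Dict String (List String)) (hnd : (d.items.map Prod.fst).Nodup) :
    tokens.foldl (pvAstep phrase) (pvSortVals d) = pvSortVals (tokens.foldl (pvBstep phrase) d) := by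
  induction tokens generalizing d with
  | nil => rfl
  | cons t ts ih =>
    simp only [List.foldl_cons]
    rw [pvStep_comm phrase d t hnd]
    exact ih _ (pvBstep_nodup phrase d t hnd)

lemma pvInnerFold_nodup (tokens : List String) (phrase : String)
    (d : PySem.Dict String (List String)) (hnd : (d.items.map Prod.fst).Nodup) :
    ((tokens.foldl (pvBstep phrase) d).items.map Prod.fst).Nodup := by
  induction tokens generalizing d with
  | nil => exact hnd
  | cons t ts ih => exact ih _ (pvBstep_nodup phrase d t hnd)

lemma pvOuterFold_comm (phrases : List String) (d : PySem.Dict String (List String))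
    (hnd : (d.items.map Prod.fst).Nodup) :
    phrases.foldl (fun d phrase => (PySem.Str.split₀ phrase).foldl (pvAstep phrase) d) (pvSortVals d) =
      pvSortVals (phrases.foldl (fun d phrase => (PySem.Str.split₀ phrase).foldl (pvBstep phrase) d) d) := by
  induction phrases generalizing d with
  | nil => rfl
  | cons p ps ih =>
    simp only [List.foldl_cons]
    rw [pvInnerFold_comm _ p d hnd]
    exact ih _ (pvInnerFold_nodup _ p d hnd)

-- ===== characterizations of the two fold results =====

-- flatten A's nested dedup-append fold to a fold over the (token, phrase) stream
lemma pvD_flat (phrases : List String) (d : PySem.Dict String (List String)) :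
    phrases.foldl (fun d phrase => (PySem.Str.split₀ phrase).foldl (pvBstep phrase) d) d =
      (pvPairs phrases).foldl (fun d q => pvBstep q.2 d q.1) d := by
  rw [pvPairs, List.foldl_flatMap]
  simp only [List.foldl_map]

-- flatten B's fold to a fold over the token stream (its step ignores the current phrase)
lemma pvC_flat (P phrases : List String) (d : PySem.Dict String (List String)) :
    phrases.foldl (fun d phrase => (PySem.Str.split₀ phrase).foldl (pvCstep P) d) d =
      (phrases.flatMap PySem.Str.split₀).foldl (pvCstep P) d := by
  rw [List.foldl_flatMap]

-- Dict.contains read off the key list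
lemma pvContains_keys (d : PySem.Dict String (List String)) (t : String) :
    List.contains (d.items.map Prod.fst) t = d.contains t := by
  unfold PySem.Dict.contains
  by_cases h : t ∈ d.items.map Prod.fst
  · obtain ⟨q, hq, hq1⟩ := List.mem_map.mp h
    have h2 : d.items.any (fun p => p.1 == t) = true :=
      List.any_eq_true.mpr ⟨q, hq, by simp [hq1]⟩
    simp [h2, h]
  · have h2 : d.items.any (fun p => p.1 == t) = false := by
      simp only [List.any_eq_false]
      intro q hq
      simp only [beq_iff_eq]
      intro hc
      exact h (hc ▸ List.mem_map_of_mem hq)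
    simp [h2, h]

-- keys evolve as set-insertion of the token, for both steps
lemma pvKeys_pvBstep (phrase : String) (d : PySem.Dict String (List String)) (token : String) :
    (pvBstep phrase d token).items.map Prod.fst =
      PySem.Set.add (d.items.map Prod.fst) token := by
  have hsd : (d.setdefault token ([] : List String)).items.map Prod.fst =
      PySem.Set.add (d.items.map Prod.fst) token := by
    unfold PySem.Dict.setdefault PySem.Set.add PySem.Set.contains
    rw [pvContains_keys]
    split_ifs with h
    · rfl
    · simp
  unfold pvBstep
  split_ifs with h
  · exact hsd
  · rw [pvKeys_insert _ token _ (pvContains_setdefault_self d token)]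
    exact hsd

lemma pvKeys_pvCstep (P : List String) (d : PySem.Dict String (List String)) (token : String) :
    (pvCstep P d token).items.map Prod.fst =
      PySem.Set.add (d.items.map Prod.fst) token := by
  unfold pvCstep PySem.Set.add PySem.Set.contains
  rw [pvContains_keys]
  split_ifs with h
  · rfl
  · unfold PySem.Dict.insert
    rw [if_neg (by simp [h])]
    simp

lemma pvKeysD (Q : List (String × String)) (d : PySem.Dict String (List String)) :
    ((Q.foldl (fun d q => pvBstep q.2 d q.1) d).items.map Prod.fst) =
      (Q.map Prod.fst).foldl PySem.Set.add (d.items.map Prod.fst) := by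
  induction Q generalizing d with
  | nil => rfl
  | cons q Q ih =>
    simp only [List.foldl_cons, List.map_cons]
    rw [ih, pvKeys_pvBstep]

lemma pvKeysC (P : List String) (T : List String) (d : PySem.Dict String (List String)) :
    ((T.foldl (pvCstep P) d).items.map Prod.fst) =
      T.foldl PySem.Set.add (d.items.map Prod.fst) := by
  induction T generalizing d with
  | nil => rfl
  | cons t T ih =>
    simp only [List.foldl_cons]
    rw [ih, pvKeys_pvCstep]

-- the dedup-append on a bucket is exactly Set.add
lemma pvAdd_eq (b : List String) (p : String) :
    (if p ∈ b then b else b ++ [p]) = PySem.Set.add b p := by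
  unfold PySem.Set.add PySem.Set.contains
  by_cases h : p ∈ b
  · rw [if_pos h, if_pos (by simpa using h)]
  · rw [if_neg h, if_neg (by simpa using h)]

-- bucket evolution of the pair-stream fold
lemma pvGetD_pvBstep (phrase : String) (d : PySem.Dict String (List String)) (token t : String) :
    (pvBstep phrase d token).getD t [] =
      if token = t then PySem.Set.add (d.getD t []) phrase else d.getD t [] := by
  by_cases ht : token = t
  · subst ht
    rw [if_pos rfl]
    unfold pvBstep
    rw [PySem.Dict.getD_setdefault_self, ← pvAdd_eq]
    split_ifs with h
    · rw [PySem.Dict.getD_setdefault_self]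
    · unfold PySem.Dict.getD
      rw [PySem.Dict.get?_insert_self]
      rfl
  · rw [if_neg ht]
    unfold pvBstep
    split_ifs with h
    · unfold PySem.Dict.getD
      rw [PySem.Dict.get?_setdefault_of_ne _ _ (Ne.symm ht)]
    · unfold PySem.Dict.getD
      rw [PySem.Dict.get?_insert_of_ne _ _ (Ne.symm ht),
        PySem.Dict.get?_setdefault_of_ne _ _ (Ne.symm ht)]

lemma pvGetD_D (Q : List (String × String)) (d : PySem.Dict String (List String)) (t : String) :
    (Q.foldl (fun d q => pvBstep q.2 d q.1) d).getD t [] =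
      ((Q.filter (fun q => q.1 == t)).map Prod.snd).foldl PySem.Set.add (d.getD t []) := by
  induction Q generalizing d with
  | nil => rfl
  | cons q Q ih =>
    simp only [List.foldl_cons]
    rw [ih]
    by_cases h : q.1 = t
    · rw [List.filter_cons_of_pos (by simp [h]), List.map_cons, List.foldl_cons,
        pvGetD_pvBstep _ _ _ _, if_pos h]
    · rw [List.filter_cons_of_neg (by simp [h])]
      rw [pvGetD_pvBstep _ _ _ _, if_neg h]

-- folding Set.add over a constant list
lemma pvFoldAdd_const (l : List String) (p : String) (hall : ∀ x ∈ l, x = p)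
    (s : PySem.Set String) :
    l.foldl PySem.Set.add s = if l = [] then s else PySem.Set.add s p := by
  induction l generalizing s with
  | nil => rfl
  | cons x xs ih =>
    have hx : x = p := hall x (by simp)
    subst hx
    simp only [List.foldl_cons]
    rw [ih (fun y hy => hall y (by simp [hy]))]
    by_cases hxs : xs = []
    · simp [hxs]
    · rw [if_neg hxs, if_neg (by simp)]
      -- Set.add is idempotent
      unfold PySem.Set.add PySem.Set.contains
      by_cases h : x ∈ s
      · simp [h]
      · simp [h]

-- the per-phrase contribution to token t's bucket stream
lemma pvBucket_stream (phrases : List String) (t : String) (s : PySem.Set String) :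
    (((pvPairs phrases).filter (fun q => q.1 == t)).map Prod.snd).foldl PySem.Set.add s =
      (phrases.filter (fun p => decide (t ∈ PySem.Str.split₀ p))).foldl PySem.Set.add s := by
  induction phrases generalizing s with
  | nil => rfl
  | cons p ps ih =>
    have hP : pvPairs (p :: ps) =
        ((PySem.Str.split₀ p).map (fun t' => (t', p))) ++ pvPairs ps := by
      simp [pvPairs]
    rw [hP, List.filter_append, List.map_append, List.foldl_append]
    have hall : ∀ x ∈ ((((PySem.Str.split₀ p).map (fun t' => (t', p))).filter
        (fun q => q.1 == t)).map Prod.snd), x = p := by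
      intro x hx
      simp only [List.mem_map, List.mem_filter, List.mem_map] at hx
      obtain ⟨q, ⟨⟨t', _, hq⟩, _⟩, hsnd⟩ := hx
      rw [← hsnd, ← hq]
    rw [pvFoldAdd_const _ p hall s]
    by_cases hmem : t ∈ PySem.Str.split₀ p
    · have hne : (((PySem.Str.split₀ p).map (fun t' => (t', p))).filter
          (fun q => q.1 == t)).map Prod.snd ≠ [] := by
        simp only [ne_eq, List.map_eq_nil_iff, List.filter_eq_nil_iff, not_forall]
        exact ⟨(t, p), by simp [hmem], by simp⟩
      rw [if_neg hne, List.filter_cons_of_pos (by simpa using hmem), List.foldl_cons]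
      exact ih _
    · have heq : (((PySem.Str.split₀ p).map (fun t' => (t', p))).filter
          (fun q => q.1 == t)).map Prod.snd = [] := by
        simp only [List.map_eq_nil_iff, List.filter_eq_nil_iff]
        intro q hq
        simp only [List.mem_map] at hq
        obtain ⟨t', ht', hq⟩ := hq
        simp only [← hq, beq_iff_eq]
        intro hcontra
        exact hmem (hcontra ▸ ht')
      rw [heq, if_pos rfl, List.filter_cons_of_neg (by simpa using hmem)]
      exact ih s

-- every entry of the B-side fold carries pvVal of its key
lemma pvC_entries (P : List String) (T : List String) (d : PySem.Dict String (List String))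
    (hd : ∀ q ∈ d.items, q.2 = pvVal P q.1) :
    ∀ q ∈ (T.foldl (pvCstep P) d).items, q.2 = pvVal P q.1 := by
  induction T generalizing d with
  | nil => exact hd
  | cons t T ih =>
    simp only [List.foldl_cons]
    apply ih
    unfold pvCstep
    split_ifs with h
    · exact hd
    · unfold PySem.Dict.insert
      rw [if_neg (by simp [h])]
      intro q hq
      rcases List.mem_append.mp hq with h1 | h2
      · exact hd q h1
      · simp only [List.mem_singleton] at h2
        subst h2
        rfl

-- with nodup keys, each entry's value is what getD returns at its key
lemma pvEntry_getD (l : List (String × List String)) (hnd : (l.map Prod.fst).Nodup)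
    (q : String × List String) (hq : q ∈ l) :
    (PySem.Dict.mk l).getD q.1 [] = q.2 := by
  induction l with
  | nil => simp at hq
  | cons p rest ih =>
    simp only [List.map_cons, List.nodup_cons] at hnd
    rcases List.mem_cons.mp hq with h1 | h2
    · subst h1
      unfold PySem.Dict.getD PySem.Dict.get?
      simp
    · have hne : p.1 ≠ q.1 := by
        intro hc
        exact hnd.1 (hc ▸ List.mem_map_of_mem h2)
      unfold PySem.Dict.getD PySem.Dict.get? at ih ⊢
      have hskip : List.find? (fun p' => p'.1 == q.1) (p :: rest) =
          List.find? (fun p' => p'.1 == q.1) rest := by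
        rw [List.find?_cons_of_neg]
        simp [hne]
      rw [hskip]
      exact ih hnd.2 h2

-- rebuild an entry list from its keys and a value function
lemma pvItems_as_map (l : List (String × List String)) (f : String → List String)
    (hf : ∀ q ∈ l, q.2 = f q.1) :
    l = (l.map Prod.fst).map (fun t => (t, f t)) := by
  rw [List.map_map]
  conv_lhs => rw [← List.map_id l]
  apply List.map_congr_left
  intro q hq
  have := hf q hq
  simp [Function.comp]
  exact Prod.ext rfl this

-- ===== VERDICT (by name: the statement is the Claim_ definition above) =====
theorem get_long_opinion_phrases_spec : Claim_equal_get_long_opinion_phrases := by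
  intro phrases _
  unfold Spec_get_long_opinion_phrases
  rw [pvA_eq, pvB_eq]
  -- A's items are the sorted buckets of the dedup-append fold
  have h0 : (PySem.Dict.empty : PySem.Dict String (List String)) = pvSortVals PySem.Dict.empty := rfl
  rw [h0, pvOuterFold_comm phrases PySem.Dict.empty (by simp [PySem.Dict.empty])]
  set dD := phrases.foldl (fun d phrase => (PySem.Str.split₀ phrase).foldl (pvBstep phrase) d)
    PySem.Dict.empty with hdD
  set dC := phrases.foldl (fun d phrase => (PySem.Str.split₀ phrase).foldl (pvCstep phrases) d)
    PySem.Dict.empty with hdC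
  -- shared key list: the deduped token stream
  have hkeysD : dD.items.map Prod.fst =
      (phrases.flatMap PySem.Str.split₀).foldl PySem.Set.add [] := by
    rw [hdD, pvD_flat, pvKeysD]
    show ((pvPairs phrases).map Prod.fst).foldl PySem.Set.add [] = _
    congr 1
    simp [pvPairs, List.map_flatMap, List.map_map, Function.comp_def]
  have hkeysC : dC.items.map Prod.fst =
      (phrases.flatMap PySem.Str.split₀).foldl PySem.Set.add [] := by
    rw [hdC, pvC_flat, pvKeysC]
    show (phrases.flatMap PySem.Str.split₀).foldl PySem.Set.add [] = _
    rfl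
  have hndD : (dD.items.map Prod.fst).Nodup := by
    rw [hkeysD]
    exact PySem.Set.nodup_ofList _
  -- D-side entries: raw buckets
  have hDval : ∀ q ∈ dD.items, q.2 = pvBucket phrases q.1 := by
    intro q hq
    have h1 : dD.getD q.1 [] = q.2 := by
      have := pvEntry_getD dD.items hndD q hq
      exact this
    rw [← h1, hdD, pvD_flat, pvGetD_D]
    have : (PySem.Dict.empty : PySem.Dict String (List String)).getD q.1 [] = [] := rfl
    rw [this, pvBucket_stream]
    rfl
  -- items as maps over the shared key list
  have hDitems : dD.items =
      (dD.items.map Prod.fst).map (fun t => (t, pvBucket phrases t)) :=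
    pvItems_as_map dD.items _ hDval
  have hCval : ∀ q ∈ dC.items, q.2 = pvVal phrases q.1 := by
    rw [hdC, pvC_flat]
    exact pvC_entries phrases _ PySem.Dict.empty (by intro q hq; simp [PySem.Dict.empty] at hq)
  have hCitems : dC.items =
      (dC.items.map Prod.fst).map (fun t => (t, pvVal phrases t)) :=
    pvItems_as_map dC.items _ hCval
  -- conclude
  show (pvSortVals dD).items = dC.items
  have : (pvSortVals dD).items = dD.items.map pvSortVal := rfl
  rw [this, hDitems, hCitems, hkeysD, hkeysC, List.map_map]
  apply List.map_congr_left
  intro t _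
  simp [Function.comp, pvSortVal, pvVal, pvBucket]
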